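-- pv_equiv track=rewrite | github.com/AnKing-VIP/anki_to_pdf | src/pdf_exporter/anking_notetypes.py | anking_notetype_base_name
-- ===== SOURCE A (Python) =====
-- ANKING_NOTETYPE_NAMES = [
--     "AnKing",
--     "AnKingDerm",
--     "AnKingMCAT",
--     "AnKingOverhaul",
--     "Basic-AnKing",
--     "Basic-AnKingLanguage",
--     "IO-one by one",
--     "Physeo-Cloze",
--     "Physeo-IO one by one",
-- ]
--
-- def anking_notetype_base_name(notetype_name: str) -> str:
--     return next(
--         (
--             name
--             for name in ANKING_NOTETYPE_NAMES
--             if notetype_name == name or notetype_name.startswith(name + " ")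
--         ),
--         None,
--     )
-- ===== SOURCE B (Python) =====
-- ANKING_NOTETYPE_NAMES = [
--     "AnKing",
--     "AnKingDerm",
--     "AnKingMCAT",
--     "AnKingOverhaul",
--     "Basic-AnKing",
--     "Basic-AnKingLanguage",
--     "IO-one by one",
--     "Physeo-Cloze",
--     "Physeo-IO one by one",
-- ]
--
-- _ANKING_SET = set(ANKING_NOTETYPE_NAMES)
--
--
-- def anking_notetype_base_name(notetype_name: str) -> str:
--     # Exact-name hit, else exact set lookup of each space-bounded prefix of the input.
--     if notetype_name in _ANKING_SET:
--         return notetype_name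
--     for i, ch in enumerate(notetype_name):
--         if ch == ' ':
--             prefix = notetype_name[:i]
--             if prefix in _ANKING_SET:
--                 return prefix
--     return None
-- ===== Notes on version B (the rewrite author's own statement) =====
-- stated objective: idiomatic
-- what changed: Instead of scanning the 9 names with == / startswith, B builds a set of the names once and walks the input's character positions, doing an exact set lookup of the whole string and of each prefix ending at a space; correct because no listed name extended by a space is a prefix of another listed name.
import Mathlib
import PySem

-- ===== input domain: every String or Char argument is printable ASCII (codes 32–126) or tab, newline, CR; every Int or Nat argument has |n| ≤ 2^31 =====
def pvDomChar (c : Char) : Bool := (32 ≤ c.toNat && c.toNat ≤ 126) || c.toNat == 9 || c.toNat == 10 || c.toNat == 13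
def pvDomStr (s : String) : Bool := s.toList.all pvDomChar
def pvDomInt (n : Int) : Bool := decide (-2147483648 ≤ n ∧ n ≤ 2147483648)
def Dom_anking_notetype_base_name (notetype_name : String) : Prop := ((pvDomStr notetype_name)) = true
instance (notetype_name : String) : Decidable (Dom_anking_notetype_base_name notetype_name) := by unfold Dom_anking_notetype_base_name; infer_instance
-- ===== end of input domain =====

-- B replaces A's scan of the 9 names (== / startswith) by one set of the names and
-- exact set lookups of the input and of its space-bounded prefixes (return value only).

-- ===== PORT A =====
def ankingNotetypeNames : List String := [
  "AnKing",
  "AnKingDerm",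
  "AnKingMCAT",
  "AnKingOverhaul",
  "Basic-AnKing",
  "Basic-AnKingLanguage",
  "IO-one by one",
  "Physeo-Cloze",
  "Physeo-IO one by one"]

def anking_notetype_base_name (notetype_name : String) : Option String :=
  ankingNotetypeNames.find?
    (fun name => notetype_name == name || PySem.Str.startswith notetype_name (name ++ " "))

-- ===== PORT B =====
def ankingSet : PySem.Set String := PySem.Set.ofList ankingNotetypeNames

def ankingGo (s : String) : List (Int × Char) → Option String
  | [] => none
  | (i, ch) :: rest =>
      if ch == ' ' then
        let pre := PySem.Str.slice s none (some i)
        if PySem.Set.contains ankingSet pre then some pre else ankingGo s rest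
      else ankingGo s rest

def anking_notetype_base_name_alt (notetype_name : String) : Option String :=
  if PySem.Set.contains ankingSet notetype_name then some notetype_name
  else ankingGo notetype_name (PySem.List.enumerate notetype_name.toList 0)

-- ===== PRECONDITION & SPEC =====
def Spec_anking_notetype_base_name (notetype_name : String) (out : Option String) : Prop := out = anking_notetype_base_name_alt notetype_name
instance (notetype_name : String) (out : Option String) : Decidable (Spec_anking_notetype_base_name notetype_name out) := by unfold Spec_anking_notetype_base_name; infer_instance

-- ===== CLAIM (what is proved, stated in full; the proofs are below) =====
def Claim_equal_anking_notetype_base_name : Prop := ∀ (notetype_name : String), Dom_anking_notetype_base_name notetype_name → Spec_anking_notetype_base_name notetype_name (anking_notetype_base_name notetype_name)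

-- ===== LEMMAS AND PROOFS =====

-- "name matches s" in A's sense, stated symmetrically: name++' ' is a prefix of s++' '.
def pmatch (s n : String) : Prop := n.toList ++ [' '] <+: s.toList ++ [' ']

theorem pmatch_cases {s n : String} (h : pmatch s n) :
    n = s ∨ n.toList ++ [' '] <+: s.toList := by
  unfold pmatch at h
  rcases Nat.lt_or_ge n.toList.length s.toList.length with hlt | hge
  · right
    have htake := List.prefix_iff_eq_take.mp h
    have hlen : n.toList.length + 1 ≤ s.toList.length := hlt
    have heq : n.toList ++ [' '] = (s.toList ++ [' ']).take (n.toList.length + 1) := by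
      simpa using htake
    rw [List.take_append_of_le_length (by simpa using hlen)] at heq
    exact heq ▸ List.take_prefix _ _
  · left
    have hlen := h.length_le
    simp at hlen
    have hl : n.toList.length = s.toList.length := le_antisymm hlen hge
    have heq : n.toList ++ [' '] = s.toList ++ [' '] := h.eq_of_length (by simp [hl])
    exact String.ext (by simpa using heq)

theorem pmatch_of_eq {s n : String} (h : n = s) : pmatch s n := by
  subst h; exact List.prefix_refl _

theorem pmatch_of_prefix {s n : String} (h : n.toList ++ [' '] <+: s.toList) : pmatch s n :=
  h.trans (List.prefix_append _ _)

-- among the listed names, space-extended prefixes are unique (finite check)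
theorem names_cmp : ∀ n1 ∈ ankingNotetypeNames, ∀ n2 ∈ ankingNotetypeNames,
    n1.toList ++ [' '] <+: n2.toList ++ [' '] → n1 = n2 := by decide

theorem pmatch_uniq {s n1 n2 : String} (h1 : n1 ∈ ankingNotetypeNames)
    (h2 : n2 ∈ ankingNotetypeNames) (p1 : pmatch s n1) (p2 : pmatch s n2) : n1 = n2 := by
  rcases List.prefix_or_prefix_of_prefix p1 p2 with h | h
  · exact names_cmp n1 h1 n2 h2 h
  · exact (names_cmp n2 h2 n1 h1 h).symm

-- A's predicate is pmatch
theorem predA_iff (s n : String) :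
    (s == n || PySem.Str.startswith s (n ++ " ")) = true ↔ pmatch s n := by
  constructor
  · intro h
    rcases Bool.or_eq_true_iff.mp h with h | h
    · exact pmatch_of_eq (eq_of_beq h).symm
    · apply pmatch_of_prefix
      have h2 := (PySem.Chars.startswith_iff s.toList (n ++ " ").toList).mp (by simpa using h)
      simpa using h2
  · intro h
    rcases pmatch_cases h with h | h
    · subst h; simp
    · apply Bool.or_eq_true_iff.mpr; right
      simp only [PySem.Str.startswith_eq]
      exact (PySem.Chars.startswith_iff s.toList (n ++ " ").toList).mpr (by simpa using h)

theorem mem_ankingSet (x : String) : x ∈ ankingSet ↔ x ∈ ankingNotetypeNames :=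
  PySem.Set.mem_ofList _ _

-- slice s[:k] for a natural k is take k
theorem slice_toList (s : String) (k : Nat) :
    (PySem.Str.slice s none (some (k : Int))).toList = s.toList.take k := by
  simp [PySem.Str.toList_slice, PySem.List.slice_to_natCast]

-- ankingGo characterizations
theorem ankingGo_none_iff (s : String) (es : List (Int × Char)) :
    ankingGo s es = none ↔ ∀ p ∈ es, p.2 = ' ' →
      PySem.Str.slice s none (some p.1) ∉ ankingSet := by
  induction es with
  | nil => simp [ankingGo]
  | cons p rest ih =>
    obtain ⟨i, ch⟩ := p
    by_cases hch : ch = ' '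
    · subst hch
      by_cases hc : PySem.Str.slice s none (some i) ∈ ankingSet
      · simp [ankingGo, hc]
      · simp [ankingGo, hc, ih]
    · simp [ankingGo, hch, ih]

theorem ankingGo_some (s : String) (es : List (Int × Char)) (r : String)
    (h : ankingGo s es = some r) :
    ∃ p ∈ es, p.2 = ' ' ∧ r = PySem.Str.slice s none (some p.1) ∧
      r ∈ ankingSet := by
  induction es with
  | nil => simp [ankingGo] at h
  | cons p rest ih =>
    obtain ⟨i, ch⟩ := p
    by_cases hch : ch = ' '
    · subst hch
      by_cases hc : PySem.Str.slice s none (some i) ∈ ankingSet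
      · simp [ankingGo, hc] at h
        exact ⟨(i, ' '), by simp, rfl, h.symm, h ▸ hc⟩
      · simp [ankingGo, hc] at h
        obtain ⟨q, hq, hrest⟩ := ih h
        exact ⟨q, by simp [hq], hrest⟩
    · simp [ankingGo, hch] at h
      obtain ⟨q, hq, hrest⟩ := ih h
      exact ⟨q, by simp [hq], hrest⟩

-- any hit of B's scan is a pmatch
theorem scan_hit_pmatch {s r : String} (h : ankingGo s (PySem.List.enumerate s.toList 0) = some r) :
    r ∈ ankingNotetypeNames ∧ pmatch s r := by
  obtain ⟨p, hp, hsp, hr, hc⟩ := ankingGo_some _ _ _ h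
  obtain ⟨k, hk, hpk⟩ := (PySem.List.mem_enumerate_iff _ _ _).mp hp
  refine ⟨(mem_ankingSet r).mp hc, ?_⟩
  have hi : p.1 = (k : Int) := by simp [hpk]
  have hrl : r.toList = s.toList.take k := by
    rw [hr, hi]; exact slice_toList s k
  have hchar : s.toList[k] = ' ' := by
    have h2 : p.2 = s.toList[k] := by simp [hpk]
    rw [← h2, hsp]
  apply pmatch_of_prefix
  have heq : r.toList ++ [' '] = s.toList.take (k + 1) := by
    rw [hrl, ← hchar]
    exact (List.take_succ_eq_append_getElem hk).symm
  rw [heq]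
  exact List.take_prefix _ _

theorem alt_of_match (s n : String) (hn : n ∈ ankingNotetypeNames)
    (hm : pmatch s n) : anking_notetype_base_name_alt s = some n := by
  unfold anking_notetype_base_name_alt
  by_cases hc : s ∈ ankingSet
  · have hs : s ∈ ankingNotetypeNames := (mem_ankingSet s).mp hc
    rw [if_pos ((PySem.Set.contains_iff ankingSet s).mpr hc)]
    exact congrArg some (pmatch_uniq hs hn (pmatch_of_eq rfl) hm)
  · rw [if_neg (fun hb => hc ((PySem.Set.contains_iff ankingSet s).mp hb))]
    -- n is a proper space-prefix of s
    have hne : n ≠ s := by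
      intro h; subst h
      exact hc ((mem_ankingSet n).mpr hn)
    have hpre : n.toList ++ [' '] <+: s.toList := (pmatch_cases hm).resolve_left hne
    set k := n.toList.length with hkdef
    have hkl : k < s.toList.length := by
      have := hpre.length_le
      simpa [hkdef] using this
    have hpre0 : n.toList <+: s.toList := (List.prefix_append n.toList [' ']).trans hpre
    have htake : s.toList.take k = n.toList := (List.prefix_iff_eq_take.mp hpre0).symm
    obtain ⟨t, ht⟩ := hpre
    have ht' : s.toList = n.toList ++ ' ' :: t := by rw [← ht]; simp
    have hq : s.toList[k]? = some ' ' := by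
      rw [ht', List.getElem?_append_right (by simp [hkdef])]
      simp [hkdef]
    have hchar : s.toList[k] = ' ' := by
      rw [List.getElem?_eq_getElem hkl] at hq
      exact Option.some_inj.mp hq
    have hslice : PySem.Str.slice s none (some ((0 : Int) + (k : Int))) = n := by
      apply String.ext
      have h3 := slice_toList s k
      rw [htake] at h3
      simpa using h3
    cases hg : ankingGo s (PySem.List.enumerate s.toList 0) with
    | none =>
      exfalso
      have hall := (ankingGo_none_iff _ _).mp hg ((0 : Int) + (k : Int), s.toList[k])
        ((PySem.List.mem_enumerate_iff _ _ _).mpr ⟨k, hkl, rfl⟩) hchar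
      rw [hslice] at hall
      exact hall ((mem_ankingSet n).mpr hn)
    | some r =>
      obtain ⟨hr, hpm⟩ := scan_hit_pmatch hg
      exact congrArg some (pmatch_uniq hr hn hpm hm)

-- ===== VERDICT (by name: the statement is the Claim_ definition above) =====
theorem anking_notetype_base_name_spec : Claim_equal_anking_notetype_base_name := by
  intro s _
  unfold Spec_anking_notetype_base_name
  cases hA : anking_notetype_base_name s with
  | some n =>
    unfold anking_notetype_base_name at hA
    have hn := List.mem_of_find?_eq_some hA
    have hp0 : (s == n || PySem.Str.startswith s (n ++ " ")) = true := List.find?_some (p := fun name => s == name || PySem.Str.startswith s (name ++ " ")) hA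
    have hp := (predA_iff s n).mp hp0
    exact (alt_of_match s n hn hp).symm
  | none =>
    unfold anking_notetype_base_name at hA
    have hall := List.find?_eq_none.mp hA
    unfold anking_notetype_base_name_alt
    by_cases hc : s ∈ ankingSet
    · exact absurd ((predA_iff s s).mpr (pmatch_of_eq rfl)) (hall s ((mem_ankingSet s).mp hc))
    · rw [if_neg (fun hb => hc ((PySem.Set.contains_iff ankingSet s).mp hb))]
      cases hg : ankingGo s (PySem.List.enumerate s.toList 0) with
      | none => rfl
      | some r =>
        exfalso
        obtain ⟨hr, hpm⟩ := scan_hit_pmatch hg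
        exact hall r hr ((predA_iff s r).mpr hpm)
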